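-- pv_equiv track=rewrite | github.com/zoe0202/Python-Data-mining-Homework | Week-02/week2-clean.py | Chinese
-- ===== SOURCE A (Python) =====
-- def Chinese(text, n, x):
--     cnt = 1
--     pre = text[0]
--     ans = pre
--     for i in range(1, len(text)):
--         if text[i] == pre:
--             cnt = cnt + 1
--         else:
--             cnt = 1
--         if n == x + 1 and cnt < n:
--             ans = ans + text[i]
--         if n == x and cnt <= n:
--             ans = ans + text[i]
--         pre = text[i]
--     return ans
-- ===== SOURCE B (Python) =====
-- def Chinese(text, n, x):
--     # single run-length cap instead of per-character counter branching
--     thr = n - 1 if n == x + 1 else (n if n == x else 0)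
--     pieces = []
--     i = 0
--     first = True
--     while i < len(text):
--         j = i
--         while j < len(text) and text[j] == text[i]:
--             j += 1
--         keep = min(j - i, thr)
--         if first:
--             keep = max(1, keep)
--             first = False
--         pieces.append(text[i] * max(0, keep))
--         i = j
--     return "".join(pieces)
-- ===== Notes on version B (the rewrite author's own statement) =====
-- stated objective: idiomatic
-- what changed: B replaces A's per-character pre/cnt comparison and the two threshold ifs by computing one run-length cap thr up front and scanning maximal runs, emitting min(run length, thr) copies (first run at least 1) per run.
import Mathlib
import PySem

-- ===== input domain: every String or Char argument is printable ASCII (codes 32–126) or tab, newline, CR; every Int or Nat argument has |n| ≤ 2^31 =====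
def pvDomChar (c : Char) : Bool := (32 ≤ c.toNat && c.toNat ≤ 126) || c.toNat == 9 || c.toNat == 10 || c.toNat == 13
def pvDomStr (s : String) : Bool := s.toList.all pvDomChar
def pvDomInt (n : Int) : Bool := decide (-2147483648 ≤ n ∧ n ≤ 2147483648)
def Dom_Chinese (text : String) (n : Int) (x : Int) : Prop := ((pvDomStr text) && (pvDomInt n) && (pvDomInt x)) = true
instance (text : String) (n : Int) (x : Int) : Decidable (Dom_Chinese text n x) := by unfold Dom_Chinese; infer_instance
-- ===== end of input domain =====

-- B scans maximal runs against one precomputed cap instead of A's per-character counter branching (idiomatic, same cost); A raises on empty text, excluded by Pre_.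

-- ===== PORT A =====
-- the for-loop over range(1,len(text)) with state (pre, cnt, ans); text[i] is the head of the remaining tail
def chineseLoop (n x : Int) : List Char → Char → Int → List Char → List Char
  | [], _, _, ans => ans
  | c :: rest, pre, cnt, ans =>
    let cnt' : Int := if c = pre then cnt + 1 else 1
    let ans' := if n = x + 1 ∧ cnt' < n then ans ++ [c] else ans
    let ans'' := if n = x ∧ cnt' ≤ n then ans' ++ [c] else ans'
    chineseLoop n x rest c cnt' ans''

def Chinese (text : String) (n : Int) (x : Int) : String :=
  match text.toList with
  | [] => ""          -- pre = text[0] raises IndexError here; excluded by Pre_Chinese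
  | pre :: rest => String.mk (chineseLoop n x rest pre 1 [pre])

-- ===== PORT B =====
def chineseThr (n x : Int) : Int := if n = x + 1 then n - 1 else if n = x then n else 0

-- the two nested while-loops: scan forward, extending the current run (c, k) until the character changes
def chineseRunsAux : List Char → Char → Nat → List (Char × Nat)
  | [], c, k => [(c, k)]
  | d :: rest, c, k => if d = c then chineseRunsAux rest c (k + 1) else (c, k) :: chineseRunsAux rest d 1

def chineseRuns : List Char → List (Char × Nat)
  | [] => []
  | c :: rest => chineseRunsAux rest c 1

def Chinese_alt (text : String) (n : Int) (x : Int) : String :=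
  let thr := chineseThr n x
  match chineseRuns text.toList with
  | [] => ""
  | (c, L) :: gs =>
      String.mk (List.replicate (max 1 (min (L : Int) thr)).toNat c ++
        gs.flatMap (fun p => List.replicate (max 0 (min (p.2 : Int) thr)).toNat p.1))

-- ===== PRECONDITION & SPEC =====
-- Pre_ excludes only the empty string, on which A raises IndexError at text[0].
def Pre_Chinese (text : String) (n : Int) (x : Int) : Prop := text ≠ ""
instance (text : String) (n : Int) (x : Int) : Decidable (Pre_Chinese text n x) := by unfold Pre_Chinese; infer_instance
def pvWitness_Chinese : String × Int × Int := ("aabba", 2, 2)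

def Spec_Chinese (text : String) (n : Int) (x : Int) (out : String) : Prop := out = Chinese_alt text n x
instance (text : String) (n : Int) (x : Int) (out : String) : Decidable (Spec_Chinese text n x out) := by unfold Spec_Chinese; infer_instance

-- ===== CLAIM (what is proved, stated in full; the proofs are below) =====
def Claim_equal_Chinese : Prop := ∀ (text : String) (n : Int) (x : Int), Dom_Chinese text n x → Pre_Chinese text n x → Spec_Chinese text n x (Chinese text n x)

-- ===== LEMMAS AND PROOFS =====

-- the forward run scanner splits off the maximal run at the front
lemma chineseRunsAux_eq : ∀ (rest : List Char) (c : Char) (k : Nat),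
    chineseRunsAux rest c k = (c, (rest.takeWhile (· = c)).length + k) :: chineseRuns (rest.dropWhile (· = c)) := by
  intro rest
  induction rest with
  | nil => intro c k; simp [chineseRunsAux, chineseRuns]
  | cons d rest ih =>
    intro c k
    by_cases h : d = c
    · subst h
      simp only [chineseRunsAux, if_true, List.takeWhile_cons, List.dropWhile_cons]
      rw [ih]
      simp only [decide_true, if_true, List.length_cons]
      congr 2
      omega
    · simp only [chineseRunsAux, if_neg h, List.takeWhile_cons, List.dropWhile_cons]
      simp only [decide_eq_true_eq, h, if_false]
      simp [chineseRuns]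

-- A's two branch ifs collapse to one comparison against the cap, provided cnt' ≥ 1
lemma chinese_step (n x cnt' : Int) (ans : List Char) (c : Char) (h : 1 ≤ cnt') :
    (if n = x ∧ cnt' ≤ n then (if n = x + 1 ∧ cnt' < n then ans ++ [c] else ans) ++ [c]
     else (if n = x + 1 ∧ cnt' < n then ans ++ [c] else ans)) =
    ans ++ (if cnt' ≤ chineseThr n x then [c] else []) := by
  unfold chineseThr
  split_ifs with h1 h2 h3 h4 h5 h6 h7 <;> simp_all <;> omega

lemma loop_replicate (n x : Int) (m : Nat) :
    ∀ (c : Char) (k : Int) (ans rest' : List Char), 1 ≤ k →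
    chineseLoop n x (List.replicate m c ++ rest') c k ans =
      chineseLoop n x rest' c (k + m)
        (ans ++ List.replicate ((min (k + m) (chineseThr n x) - min k (chineseThr n x)).toNat) c) := by
  induction m with
  | zero => intro c k ans rest' hk; simp
  | succ m ih =>
    intro c k ans rest' hk
    rw [List.replicate_succ]
    simp only [List.cons_append, chineseLoop, if_true]
    rw [chinese_step n x (k+1) ans c (by omega), ih c (k+1) _ rest' (by omega)]
    have harith : (k + 1 + (m : Int)) = k + ((m : Nat) + 1 : Nat) := by push_cast; ring
    rw [harith]
    congr 1
    rw [List.append_assoc]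
    congr 1
    by_cases hle : (k + 1 : Int) ≤ chineseThr n x
    · rw [if_pos hle]
      rw [show ([c] : List Char) = List.replicate 1 c from rfl, ← List.replicate_add]
      congr 1
      push_cast
      omega
    · rw [if_neg hle]
      rw [List.nil_append]
      congr 1
      push_cast
      omega

lemma dropWhile_head_ne (c : Char) : ∀ (l : List Char), (l.dropWhile (· = c)).head? ≠ some c := by
  intro l
  induction l with
  | nil => simp [List.dropWhile]
  | cons a t ih =>
    by_cases h : a = c
    · simpa [List.dropWhile, h] using ih
    · simp [List.dropWhile, h]

lemma takeWhile_eq_replicate (c : Char) (l : List Char) :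
    l.takeWhile (· = c) = List.replicate (l.takeWhile (· = c)).length c := by
  rw [List.eq_replicate_iff]
  refine ⟨rfl, ?_⟩
  intro b hb
  have := List.mem_takeWhile_imp hb
  simpa using this

lemma loop_rest (n x : Int) : ∀ (len : Nat) (cs : List Char) (pre : Char) (cnt : Int) (ans : List Char),
    cs.length ≤ len → cs.head? ≠ some pre →
    chineseLoop n x cs pre cnt ans =
      ans ++ (chineseRuns cs).flatMap
        (fun p => List.replicate (max 0 (min (p.2 : Int) (chineseThr n x))).toNat p.1) := by
  intro len
  induction len with
  | zero =>
    intro cs pre cnt ans hlen _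
    interval_cases h : cs.length
    rw [List.length_eq_zero_iff] at h
    subst h
    simp [chineseLoop, chineseRuns]
  | succ len ih =>
    intro cs pre cnt ans hlen hne
    match cs with
    | [] => simp [chineseLoop, chineseRuns]
    | c :: rest =>
      have hcp : c ≠ pre := by simpa using hne
      simp only [chineseLoop, if_neg hcp]
      rw [chinese_step n x 1 ans c (by omega)]
      have hsplit : rest = rest.takeWhile (· = c) ++ rest.dropWhile (· = c) :=
        (List.takeWhile_append_dropWhile).symm
      set t := rest.takeWhile (· = c) with ht
      set d := rest.dropWhile (· = c) with hd
      have hrep : t = List.replicate t.length c := takeWhile_eq_replicate c rest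
      conv_lhs => rw [hsplit, hrep]
      rw [loop_replicate n x t.length c 1 _ d (by omega)]
      have hdlen : d.length ≤ len := by
        have h1 : d.length ≤ rest.length := List.length_dropWhile_le _ _
        simp only [List.length_cons] at hlen
        omega
      rw [ih d c _ _ hdlen (by rw [hd]; exact dropWhile_head_ne c rest)]
      show (ans ++ _) ++ _ ++ _ = ans ++ _
      rw [show chineseRuns (c :: rest) = (c, t.length + 1) :: chineseRuns d from by
        rw [show chineseRuns (c :: rest) = chineseRunsAux rest c 1 from rfl, chineseRunsAux_eq, ← ht, ← hd]]
      simp only [List.flatMap_cons, List.append_assoc]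
      congr 1
      rw [← List.append_assoc]
      congr 1
      have hforms : (if (1:Int) ≤ chineseThr n x then [c] else []) ++
          List.replicate ((min (1 + (t.length:Int)) (chineseThr n x) - min 1 (chineseThr n x)).toNat) c =
          List.replicate (max 0 (min ((t.length + 1 : Nat) : Int) (chineseThr n x))).toNat c := by
        by_cases h1 : (1:Int) ≤ chineseThr n x
        · rw [if_pos h1, show ([c] : List Char) = List.replicate 1 c from rfl, ← List.replicate_add]
          congr 1
          push_cast
          omega
        · rw [if_neg h1, List.nil_append]
          congr 1
          push_cast
          omega
      exact hforms

lemma chinese_main (n x : Int) (pre : Char) (rest : List Char) :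
    chineseLoop n x rest pre 1 [pre] =
      List.replicate (max 1 (min ((rest.takeWhile (· = pre)).length + 1 : Int) (chineseThr n x))).toNat pre ++
      (chineseRuns (rest.dropWhile (· = pre))).flatMap
        (fun p => List.replicate (max 0 (min (p.2 : Int) (chineseThr n x))).toNat p.1) := by
  have hsplit : rest = rest.takeWhile (· = pre) ++ rest.dropWhile (· = pre) :=
    (List.takeWhile_append_dropWhile).symm
  set t := rest.takeWhile (· = pre) with ht
  set d := rest.dropWhile (· = pre) with hd
  have hrep : t = List.replicate t.length pre := takeWhile_eq_replicate pre rest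
  conv_lhs => rw [hsplit, hrep]
  rw [loop_replicate n x t.length pre 1 _ d (by omega)]
  rw [loop_rest n x d.length d pre _ _ le_rfl (by rw [hd]; exact dropWhile_head_ne pre rest)]
  congr 1
  rw [show ([pre] : List Char) = List.replicate 1 pre from rfl, ← List.replicate_add]
  congr 1
  omega

-- ===== VERDICT =====
theorem Chinese_spec : Claim_equal_Chinese := by
  intro text n x _ hpre
  unfold Spec_Chinese Chinese Chinese_alt
  match h : text.toList with
  | [] =>
    exact absurd (by simpa [String.toList_eq_nil_iff] using h) hpre
  | pre :: rest =>
    simp only [chineseRuns]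
    rw [chineseRunsAux_eq, chinese_main n x pre rest]
    push_cast
    rfl
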